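-- pv_equiv track=rewrite | github.com/zhijie-yan/dataProcess | waterDict/extractRelation.py | depTrans
-- ===== SOURCE A (Python) =====
-- def depTrans(dep):
--     """
--     将dep结果转换成字典形式
--     @param dep: ltp调用dep后结果
--     @return: 返回重新组织的字典结构
--     """
--     result = {}
--     for tuple in dep:
--         first = tuple[0]
--         second = tuple[1]
--         rel = tuple[2]
--         if rel not in result:
--             result[rel] = [(first, second)]
--         else:
--             result[rel].append((first, second))
--     return result
-- ===== SOURCE B (Python) =====
-- def depTrans(dep):
--     """Group (first, second, rel) triples by rel: distinct rels in first-occurrence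
--     order, then one filtered pass per rel (dict comprehension) instead of a single
--     scan with per-element membership tests and in-place appends."""
--     rels = list(dict.fromkeys(t[2] for t in dep))
--     return {r: [(t[0], t[1]) for t in dep if t[2] == r] for r in rels}
-- ===== Notes on version B (the rewrite author's own statement) =====
-- stated objective: idiomatic
-- what changed: Replaces the single scan with per-element membership tests and in-place appends by a dict comprehension: collect the distinct relations in first-occurrence order with dict.fromkeys, then build each group by one filtered pass over the input.
import Mathlib
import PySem

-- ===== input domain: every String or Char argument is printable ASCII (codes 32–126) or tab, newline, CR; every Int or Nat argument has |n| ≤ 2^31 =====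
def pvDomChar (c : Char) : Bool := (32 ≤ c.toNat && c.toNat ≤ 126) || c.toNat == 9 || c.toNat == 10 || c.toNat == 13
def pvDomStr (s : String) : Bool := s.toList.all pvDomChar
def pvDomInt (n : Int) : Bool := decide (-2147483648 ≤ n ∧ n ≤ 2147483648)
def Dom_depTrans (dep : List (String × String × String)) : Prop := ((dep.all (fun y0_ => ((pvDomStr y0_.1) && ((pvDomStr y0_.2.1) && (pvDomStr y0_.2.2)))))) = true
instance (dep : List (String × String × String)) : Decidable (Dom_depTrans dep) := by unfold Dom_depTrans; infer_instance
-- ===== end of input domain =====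

-- B differs from A only in decomposition; same return value everywhere (A is total).

-- ===== PORT A =====
-- A: one scan; new relation -> insert singleton group, known relation -> append to its group.
def depTrans (dep : List (String × String × String)) : List (String × List (String × String)) :=
  (dep.foldl (fun result t =>
      if result.contains t.2.2 then
        result.modify t.2.2 [] (fun l => l ++ [(t.1, t.2.1)])
      else
        result.insert t.2.2 [(t.1, t.2.1)])
    PySem.Dict.empty).items

-- ===== PORT B =====
-- B: distinct relations in first-occurrence order, then one filtered pass per relation.
def depTrans_alt (dep : List (String × String × String)) : List (String × List (String × String)) :=
  (PySem.List.dedup (dep.map (fun t => t.2.2))).map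
    (fun r => (r, (dep.filter (fun t => t.2.2 == r)).map (fun t => (t.1, t.2.1))))

-- ===== PRECONDITION & SPEC =====
def Spec_depTrans (dep : List (String × String × String)) (out : List (String × List (String × String))) : Prop := out = depTrans_alt dep
instance (dep : List (String × String × String)) (out : List (String × List (String × String))) : Decidable (Spec_depTrans dep out) := by unfold Spec_depTrans; infer_instance

-- ===== CLAIM (what is proved, stated in full; the proofs are below) =====
def Claim_equal_depTrans : Prop := ∀ (dep : List (String × String × String)), Dom_depTrans dep → Spec_depTrans dep (depTrans dep)

-- ===== LEMMAS AND PROOFS =====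

-- A's branch "insert if fresh, modify-append otherwise" is exactly Dict.modify with default [].
lemma branch_eq_modify (d : PySem.Dict String (List (String × String)))
    (k : String) (p : String × String) :
    (if d.contains k then d.modify k [] (fun l => l ++ [p]) else d.insert k [p])
      = d.modify k [] (fun l => l ++ [p]) := by
  by_cases h : d.contains k
  · simp [h]
  · have h' : d.contains k = false := by simpa using h
    simp [PySem.Dict.modify, PySem.Dict.getD_of_not_contains, h']

lemma foldA_eq (dep : List (String × String × String)) :
    (dep.foldl (fun result t =>
        if result.contains t.2.2 then
          result.modify t.2.2 [] (fun l => l ++ [(t.1, t.2.1)])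
        else
          result.insert t.2.2 [(t.1, t.2.1)])
      PySem.Dict.empty)
    = ((dep.map (fun t => (t.2.2, (t.1, t.2.1)))).foldl
        (fun d p => d.modify p.1 [] (fun l => l ++ [p.2])) PySem.Dict.empty) := by
  rw [List.foldl_map]
  congr 1
  funext d t
  exact branch_eq_modify d t.2.2 (t.1, t.2.1)

-- ===== VERDICT (by name: the statement is the Claim_ definition above) =====
theorem depTrans_spec : Claim_equal_depTrans := by
  intro dep _
  show depTrans dep = depTrans_alt dep
  unfold depTrans depTrans_alt
  rw [foldA_eq]
  set l := dep.map (fun t => (t.2.2, (t.1, t.2.1))) with hl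
  set D := l.foldl (fun d p => d.modify p.1 [] (fun l => l ++ [p.2])) PySem.Dict.empty with hD
  have hnd : D.keys.Nodup := by
    rw [hD]
    exact PySem.Dict.nodup_keys_foldl_modify_key l (fun p => p.1) []
      (fun d p => fun v => v ++ [p.2]) PySem.Dict.empty (by simp)
  have hkeys : D.keys = PySem.Set.ofList (dep.map (fun t => t.2.2)) := by
    rw [hD, PySem.Dict.keys_foldl_modify_key]
    simp [hl, List.map_map, PySem.Dict.keys_empty, PySem.Set.update, PySem.Set.ofList,
      Function.comp_def]
  have hget : ∀ r, D.getD r [] =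
      (dep.filter (fun t => t.2.2 == r)).map (fun t => (t.1, t.2.1)) := by
    intro r
    rw [hD, PySem.Dict.getD_foldl_modify_append]
    simp [hl, List.filter_map, List.map_map, Function.comp_def]
  rw [PySem.Dict.items_eq_map_keys D hnd [], hkeys]
  simp only [PySem.List.dedup]
  exact List.map_congr_left (fun r _ => by rw [hget r])
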